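-- pv_equiv track=rewrite | github.com/nicorellius/acrosite | acros/apps/generator/parts_of_speech.py | adj_adj_noun_pattern
-- ===== SOURCE A (Python) =====
-- def adj_adj_noun_pattern(vertical_word, is_plural):
--
--     """
--     when the vertical_word has more than 3 letters,
--     repeat adjective-adjective-noun, otherwise, handle specially.
--     """
--
--     characters = list(vertical_word)
--
--     counter = 0
--     parts_of_speech = []
--
--     if len(characters) == 1:
--         if is_plural:
--             parts_of_speech = ['NP']
--         else:
--             parts_of_speech = ['NS']
--     elif len(characters) == 2:
--         if is_plural:
--             parts_of_speech = ['A','NP']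
--         else:
--             parts_of_speech = ['A','NS']
--     else:
--         while counter < len(characters):
--             if counter % 3 == 2:
--                 if is_plural:
--                     parts_of_speech.append('NP')
--                 else:
--                     parts_of_speech.append('NS')
--             else:
--                 parts_of_speech.append('A')
--             counter += 1
--
--         if counter % 3 == 1:
--             del parts_of_speech[-3]
--             if is_plural:
--                 parts_of_speech.append('NP')
--                 parts_of_speech.append('A')
--                 parts_of_speech.append('NP')
--             else:
--                 parts_of_speech.append('NS')
--                 parts_of_speech.append('A')
--                 parts_of_speech.append('NS')
--
--         elif counter % 3 == 2:
--             del parts_of_speech[-1]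
--             if is_plural:
--                 parts_of_speech.append('NP')
--             else:
--                 parts_of_speech.append('NS')
--
--     return parts_of_speech
-- ===== SOURCE B (Python) =====
-- def adj_adj_noun_pattern(vertical_word, is_plural):
--     noun = 'NP' if is_plural else 'NS'
--     n = len(vertical_word)
--     if n == 0:
--         return []
--     if n == 1:
--         return [noun]
--     if n == 2:
--         return ['A', noun]
--     block = ['A', 'A', noun]
--     if n % 3 == 0:
--         return block * (n // 3)
--     if n % 3 == 2:
--         return block * (n // 3) + ['A', noun]
--     # n % 3 == 1: the original emits n+2 items here; closed form:
--     return block * ((n - 4) // 3) + ['A', noun, 'A', noun, 'A', noun]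
-- ===== Notes on version B (the rewrite author's own statement) =====
-- stated objective: simpler
-- what changed: Replaces the per-character while loop with its del/re-append post-fix by a direct closed-form construction: repeat the ['A','A',noun] block n//3 times and append the residue tail chosen by n % 3 (reproducing the original's n+2-length output when n % 3 == 1); list repetition avoids per-element appends and branches.
import Mathlib
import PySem

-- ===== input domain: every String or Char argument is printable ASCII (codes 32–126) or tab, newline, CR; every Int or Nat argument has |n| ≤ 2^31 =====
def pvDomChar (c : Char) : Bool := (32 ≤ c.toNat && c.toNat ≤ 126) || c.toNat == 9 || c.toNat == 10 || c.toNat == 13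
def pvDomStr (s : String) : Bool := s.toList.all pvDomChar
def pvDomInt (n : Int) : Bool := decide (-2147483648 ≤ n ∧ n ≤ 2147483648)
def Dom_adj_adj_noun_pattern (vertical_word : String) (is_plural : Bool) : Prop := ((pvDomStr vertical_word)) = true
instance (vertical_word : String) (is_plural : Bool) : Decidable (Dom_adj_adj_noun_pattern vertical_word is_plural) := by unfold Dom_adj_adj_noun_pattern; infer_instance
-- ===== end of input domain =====

-- B replaces A's per-character loop plus del/re-append fix-up by a closed-form block construction (simpler; same behaviour, including the n+2-length output when n % 3 == 1).

-- ===== PORT A =====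
-- the while loop: counter runs from 0 while counter < len, appending to the accumulator
def pvALoop (len : Nat) (is_plural : Bool) (counter : Nat) (acc : List String) : List String :=
  if counter < len then
    pvALoop len is_plural (counter + 1)
      (acc ++ [if counter % 3 == 2 then (if is_plural then "NP" else "NS") else "A"])
  else acc
termination_by len - counter

def adj_adj_noun_pattern (vertical_word : String) (is_plural : Bool) : List String :=
  let characters := vertical_word.toList
  if characters.length == 1 then
    if is_plural then ["NP"] else ["NS"]
  else if characters.length == 2 then
    if is_plural then ["A", "NP"] else ["A", "NS"]
  else
    let pos := pvALoop characters.length is_plural 0 []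
    let counter := characters.length
    if counter % 3 == 1 then
      -- del parts_of_speech[-3] : exact here since the list has ≥ 3 elements
      let pos := pos.eraseIdx (pos.length - 3)
      pos ++ (if is_plural then ["NP", "A", "NP"] else ["NS", "A", "NS"])
    else if counter % 3 == 2 then
      -- del parts_of_speech[-1]
      let pos := pos.eraseIdx (pos.length - 1)
      pos ++ (if is_plural then ["NP"] else ["NS"])
    else pos

-- ===== PORT B =====
-- block * k  (Python list repetition)
def pvRep (b : List String) (k : Nat) : List String := (List.replicate k b).flatten

def adj_adj_noun_pattern_alt (vertical_word : String) (is_plural : Bool) : List String :=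
  let noun := if is_plural then "NP" else "NS"
  let n := vertical_word.toList.length
  if n == 0 then []
  else if n == 1 then [noun]
  else if n == 2 then ["A", noun]
  else
    let block := ["A", "A", noun]
    if n % 3 == 0 then pvRep block (n / 3)
    else if n % 3 == 2 then pvRep block (n / 3) ++ ["A", noun]
    else pvRep block ((n - 4) / 3) ++ ["A", noun, "A", noun, "A", noun]

-- ===== PRECONDITION & SPEC =====
def Spec_adj_adj_noun_pattern (vertical_word : String) (is_plural : Bool) (out : List String) : Prop := out = adj_adj_noun_pattern_alt vertical_word is_plural
instance (vertical_word : String) (is_plural : Bool) (out : List String) : Decidable (Spec_adj_adj_noun_pattern vertical_word is_plural out) := by unfold Spec_adj_adj_noun_pattern; infer_instance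

-- ===== CLAIM (what is proved, stated in full; the proofs are below) =====
def Claim_equal_adj_adj_noun_pattern : Prop := ∀ (vertical_word : String) (is_plural : Bool), Dom_adj_adj_noun_pattern vertical_word is_plural → Spec_adj_adj_noun_pattern vertical_word is_plural (adj_adj_noun_pattern vertical_word is_plural)

-- ===== LEMMAS AND PROOFS =====

theorem pvALoop_eq_map (is_plural : Bool) :
    ∀ (fuel c : Nat) (acc : List String),
      pvALoop (c + fuel) is_plural c acc =
        acc ++ (List.range fuel).map
          (fun j => if (c + j) % 3 == 2 then (if is_plural then "NP" else "NS") else "A") := by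
  intro fuel
  induction fuel with
  | zero => intro c acc; rw [pvALoop]; simp
  | succ m ih =>
    intro c acc
    rw [pvALoop]
    have hlt : c < c + (m + 1) := by omega
    simp only [hlt, if_true]
    have h1 : c + (m + 1) = (c + 1) + m := by omega
    rw [h1, ih (c + 1)]
    simp [List.range_succ_eq_map, List.map_map, Function.comp]
    intro j _
    have hj : c + 1 + j = c + (j + 1) := by omega
    rw [hj]

def pvMapf (noun : String) (n : Nat) : List String :=
  (List.range n).map (fun j => if j % 3 == 2 then noun else "A")

theorem pvMapf_succ (noun : String) (n : Nat) :
    pvMapf noun (n + 1) = pvMapf noun n ++ [if n % 3 == 2 then noun else "A"] := by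
  simp [pvMapf, List.range_succ]

theorem pvRep_succ (b : List String) (k : Nat) :
    pvRep b (k + 1) = pvRep b k ++ b := by
  simp [pvRep, List.replicate_succ']

theorem pvRep_length (noun : String) (k : Nat) :
    (pvRep ["A", "A", noun] k).length = 3 * k := by
  induction k with
  | zero => simp [pvRep]
  | succ m ih => rw [pvRep_succ]; simp [ih]; omega

theorem pvMapf_mul3 (noun : String) (k : Nat) :
    pvMapf noun (3 * k) = pvRep ["A", "A", noun] k := by
  induction k with
  | zero => simp [pvMapf, pvRep]
  | succ m ih =>
    have h : 3 * (m + 1) = (3 * m + 1) + 1 + 1 := by omega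
    rw [h, pvMapf_succ, pvMapf_succ, pvMapf_succ, ih, pvRep_succ]
    have h0 : (3 * m) % 3 = 0 := by omega
    have h1 : (3 * m + 1) % 3 = 1 := by omega
    have h2 : (3 * m + 1 + 1) % 3 = 2 := by omega
    simp [h0, h1, h2]

theorem pvMapf_mul3_add1 (noun : String) (k : Nat) :
    pvMapf noun (3 * k + 1) = pvRep ["A", "A", noun] k ++ ["A"] := by
  rw [pvMapf_succ, pvMapf_mul3]
  have h0 : (3 * k) % 3 = 0 := by omega
  simp [h0]

theorem pvMapf_mul3_add2 (noun : String) (k : Nat) :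
    pvMapf noun (3 * k + 2) = pvRep ["A", "A", noun] k ++ ["A", "A"] := by
  have h : 3 * k + 2 = (3 * k + 1) + 1 := by omega
  rw [h, pvMapf_succ, pvMapf_mul3_add1]
  have h1 : (3 * k + 1) % 3 = 1 := by omega
  simp [h1]

-- the core equality, as a statement about the length n of the word
theorem pv_core (n : Nat) (is_plural : Bool) :
    (if n == 1 then (if is_plural then ["NP"] else ["NS"])
     else if n == 2 then (if is_plural then ["A", "NP"] else ["A", "NS"])
     else
       let pos := pvALoop n is_plural 0 []
       if n % 3 == 1 then
         pos.eraseIdx (pos.length - 3) ++ (if is_plural then ["NP", "A", "NP"] else ["NS", "A", "NS"])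
       else if n % 3 == 2 then
         pos.eraseIdx (pos.length - 1) ++ (if is_plural then ["NP"] else ["NS"])
       else pos)
    = adj_adj_noun_pattern_alt (String.ofList (List.replicate n 'x')) is_plural := by
  have hlen : (String.ofList (List.replicate n 'x')).toList.length = n := by
    rw [String.toList_ofList]; simp
  unfold adj_adj_noun_pattern_alt
  rw [hlen]
  set noun := (if is_plural then "NP" else "NS") with hnoun
  have hX1 : (if is_plural then ["NP", "A", "NP"] else ["NS", "A", "NS"]) = [noun, "A", noun] := by
    cases is_plural <;> simp [hnoun]
  have hX2 : (if is_plural then ["NP"] else ["NS"]) = [noun] := by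
    cases is_plural <;> simp [hnoun]
  have hloop : pvALoop n is_plural 0 [] = pvMapf noun n := by
    have := pvALoop_eq_map is_plural n 0 []
    simpa [pvMapf, hnoun] using this
  by_cases h0 : n = 0
  · subst h0; cases is_plural <;> simp [pvALoop]
  by_cases h1 : n = 1
  · subst h1; cases is_plural <;> simp [hnoun]
  by_cases h2 : n = 2
  · subst h2; cases is_plural <;> simp [hnoun]
  have b0 : (n == 0) = false := by simp [h0]
  have b1 : (n == 1) = false := by simp [h1]
  have b2 : (n == 2) = false := by simp [h2]
  simp only [b0, b1, b2, Bool.false_eq_true, if_false, hloop, hX1, hX2]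
  have hdm := Nat.div_add_mod n 3
  set k := n / 3 with hk
  have hmod : n % 3 < 3 := Nat.mod_lt n (by norm_num)
  interval_cases h : n % 3
  · -- n = 3k
    have hn : n = 3 * k := by omega
    simp only [h, show ((0:Nat) == 1) = false from rfl, show ((0:Nat) == 2) = false from rfl,
               show ((0:Nat) == 0) = true from rfl, Bool.false_eq_true, if_false, if_true]
    rw [hn, pvMapf_mul3, hk, hn, Nat.mul_div_cancel_left _ (by norm_num : 0 < 3)]
  · -- n = 3k + 1, k ≥ 1
    have hn : n = 3 * k + 1 := by omega
    have hk1 : 1 ≤ k := by omega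
    obtain ⟨m, hm⟩ : ∃ m, k = m + 1 := ⟨k - 1, by omega⟩
    simp only [h, show ((1:Nat) == 1) = true from rfl, show ((1:Nat) == 0) = false from rfl,
               Bool.false_eq_true, if_true, if_false]
    rw [hn, pvMapf_mul3_add1]
    have hlen2 : (pvRep ["A", "A", noun] k ++ ["A"]).length = 3 * k + 1 := by
      simp [pvRep_length]
    rw [hlen2, hm, pvRep_succ]
    have hL : (pvRep ["A", "A", noun] m).length = 3 * m := pvRep_length noun m
    have hidx : 3 * (m + 1) + 1 - 3 = (pvRep ["A", "A", noun] m).length + 1 := by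
      rw [hL]; omega
    rw [List.append_assoc, hidx, List.eraseIdx_append_of_length_le (by omega)]
    have hsub : (pvRep ["A", "A", noun] m).length + 1 - (pvRep ["A", "A", noun] m).length = 1 := by omega
    rw [hsub]
    have h4 : (3 * (m + 1) + 1 - 4) / 3 = m := by omega
    rw [h4]
    simp [List.eraseIdx]
  · -- n = 3k + 2
    have hn : n = 3 * k + 2 := by omega
    simp only [h, show ((2:Nat) == 1) = false from rfl, show ((2:Nat) == 2) = true from rfl,
               show ((2:Nat) == 0) = false from rfl, Bool.false_eq_true, if_false, if_true]
    rw [hn, pvMapf_mul3_add2]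
    have hlen2 : (pvRep ["A", "A", noun] k ++ ["A", "A"]).length = 3 * k + 2 := by
      simp [pvRep_length]
    rw [hlen2]
    have hL : (pvRep ["A", "A", noun] k).length = 3 * k := pvRep_length noun k
    have hidx : 3 * k + 2 - 1 = (pvRep ["A", "A", noun] k).length + 1 := by rw [hL]; omega
    rw [hidx, List.eraseIdx_append_of_length_le (by omega)]
    have hsub : (pvRep ["A", "A", noun] k).length + 1 - (pvRep ["A", "A", noun] k).length = 1 := by omega
    rw [hsub]
    simp [List.eraseIdx]

theorem pv_alt_len_only (w : String) (is_plural : Bool) :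
    adj_adj_noun_pattern_alt w is_plural
      = adj_adj_noun_pattern_alt (String.ofList (List.replicate w.toList.length 'x')) is_plural := by
  unfold adj_adj_noun_pattern_alt
  rw [String.toList_ofList]
  simp

-- ===== VERDICT (by name: the statement is the Claim_ definition above) =====
theorem adj_adj_noun_pattern_spec : Claim_equal_adj_adj_noun_pattern := by
  intro w is_plural _
  unfold Spec_adj_adj_noun_pattern adj_adj_noun_pattern
  rw [pv_alt_len_only]
  exact pv_core w.toList.length is_plural
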